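-- pv_equiv track=rewrite | github.com/nauticalab/orcapod-python | src/orcapod/utils/arrow_utils.py | pydict_to_pylist
-- ===== SOURCE A (Python) =====
-- def pydict_to_pylist(pydict: dict) -> list[dict]:
--     """
--     Convert a dictionary of lists (columnar format) to a list of dictionaries.
--
--     This function transforms column-based data (dict of lists) to row-based data
--     (list of dicts), similar to converting from columnar format to records format.
--     All arrays in the input dictionary must have the same length.
--
--     Args:
--         pydict: Dictionary where keys are column names and values are lists of column data
--
--     Returns:
--         List of dictionaries representing rows of data
--
--     Raises:
--         ValueError: If arrays in the dictionary have inconsistent lengths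
--
--     Example:
--         >>> data = {'a': [1, 3], 'b': [2, None], 'c': [None, 4]}
--         >>> pydict_to_pylist(data)
--         [{'a': 1, 'b': 2, 'c': None}, {'a': 3, 'b': None, 'c': 4}]
--     """
--     if not pydict:
--         return []
--
--     # Check all arrays have same length
--     lengths = [len(v) for v in pydict.values()]
--     if not all(length == lengths[0] for length in lengths):
--         raise ValueError(
--             f"Inconsistent array lengths: {dict(zip(pydict.keys(), lengths))}"
--         )
--
--     num_rows = lengths[0]
--     if num_rows == 0:
--         return []
--
--     result = []
--     keys = pydict.keys()
--     for i in range(num_rows):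
--         row = {k: pydict[k][i] for k in keys}
--         result.append(row)
--     return result
-- ===== SOURCE B (Python) =====
-- def pydict_to_pylist(pydict: dict) -> list[dict]:
--     if not pydict:
--         return []
--     lengths = [len(v) for v in pydict.values()]
--     if any(length != lengths[0] for length in lengths):
--         raise ValueError(
--             f"Inconsistent array lengths: {dict(zip(pydict.keys(), lengths))}"
--         )
--     num_rows = lengths[0]
--     result = [{} for _ in range(num_rows)]
--     for k, col in pydict.items():
--         for i, v in enumerate(col):
--             result[i][k] = v
--     return result
-- ===== Notes on version B (the rewrite author's own statement) =====
-- stated objective: alternative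
-- what changed: B builds the rows column-major: it preallocates one empty dict per row and fills them by iterating each column once with enumerate, instead of A's row-major pass that re-looks up every column key for every row index.
import Mathlib
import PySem

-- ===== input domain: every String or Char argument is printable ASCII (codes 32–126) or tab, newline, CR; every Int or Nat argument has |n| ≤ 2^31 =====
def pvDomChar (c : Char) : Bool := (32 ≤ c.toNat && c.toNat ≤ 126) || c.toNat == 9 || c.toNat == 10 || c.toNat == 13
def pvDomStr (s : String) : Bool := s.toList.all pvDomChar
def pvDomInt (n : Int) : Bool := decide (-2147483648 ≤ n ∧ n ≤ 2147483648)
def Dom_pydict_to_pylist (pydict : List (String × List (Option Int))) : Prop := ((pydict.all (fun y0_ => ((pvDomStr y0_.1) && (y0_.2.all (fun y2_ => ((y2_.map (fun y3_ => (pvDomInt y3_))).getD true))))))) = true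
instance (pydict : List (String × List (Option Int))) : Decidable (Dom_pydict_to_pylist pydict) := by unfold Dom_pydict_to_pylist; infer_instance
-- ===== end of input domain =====

-- B builds the rows column-major (preallocated row dicts, one enumerate pass per column)
-- instead of A's row-major pass that looks every column up again for each row index.

-- ===== PORT A =====
-- dict lookup pydict[k] on the association-list encoding: first match (exact for unique keys)
def pvLookupA (pydict : List (String × List (Option Int))) (k : String) : List (Option Int) :=
  ((pydict.find? (fun kv => kv.1 == k)).map Prod.snd).getD []

def pydict_to_pylist (pydict : List (String × List (Option Int))) : List (List (String × Option Int)) :=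
  if pydict = [] then []
  else
    let lengths : List Int := pydict.map (fun kv => (kv.2.length : Int))
    if lengths.all (fun l => l == lengths.headD 0) then
      let numRows : Int := lengths.headD 0
      if numRows = 0 then []
      else
        (PySem.List.pyRange 0 numRows 1).map (fun i =>
          pydict.map (fun kv => (kv.1, PySem.List.pyGetD (pvLookupA pydict kv.1) i none)))
    else []  -- Python raises ValueError here; excluded by Pre_

-- ===== PORT B =====
-- Python dict assignment row[k] = v on the association-list encoding: overwrite in place, else append
def pvRowInsert (row : List (String × Option Int)) (k : String) (v : Option Int) : List (String × Option Int) :=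
  match row with
  | [] => [(k, v)]
  | p :: rest => if p.1 == k then (k, v) :: rest else p :: pvRowInsert rest k v

def pydict_to_pylist_alt (pydict : List (String × List (Option Int))) : List (List (String × Option Int)) :=
  if pydict = [] then []
  else
    let lengths : List Int := pydict.map (fun kv => (kv.2.length : Int))
    if lengths.any (fun l => l != lengths.headD 0) then []  -- Python raises ValueError here; excluded by Pre_
    else
      let numRows : Nat := (lengths.headD 0).toNat
      pydict.foldl (fun result kcol =>
        (PySem.List.enumerate kcol.2 0).foldl (fun res iv =>
          PySem.List.pySetD res iv.1 (pvRowInsert (PySem.List.pyGetD res iv.1 []) kcol.1 iv.2)) result)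
        (List.replicate numRows [])

-- ===== PRECONDITION & SPEC =====
-- Pre_ excludes (a) dictionaries whose columns have inconsistent lengths, on which A raises
-- ValueError, and (b) association lists with duplicate keys, which a Python dict cannot
-- represent (the encoding is non-canonical there, so neither behaviour is A's).
def Pre_pydict_to_pylist (pydict : List (String × List (Option Int))) : Prop :=
  (pydict.map Prod.fst).Nodup ∧
  ∀ kv ∈ pydict, kv.2.length = (pydict.headD ("", [])).2.length
instance (pydict : List (String × List (Option Int))) : Decidable (Pre_pydict_to_pylist pydict) := by
  unfold Pre_pydict_to_pylist; infer_instance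
def pvWitness_pydict_to_pylist : (List (String × List (Option Int))) :=
  [("a", [some 1, some 3]), ("b", [some 2, none]), ("c", [none, some 4])]

def Spec_pydict_to_pylist (pydict : List (String × List (Option Int))) (out : List (List (String × Option Int))) : Prop := out = pydict_to_pylist_alt pydict
instance (pydict : List (String × List (Option Int))) (out : List (List (String × Option Int))) : Decidable (Spec_pydict_to_pylist pydict out) := by unfold Spec_pydict_to_pylist; infer_instance

-- ===== CLAIM (what is proved, stated in full; the proofs are below) =====
def Claim_equal_pydict_to_pylist : Prop := ∀ (pydict : List (String × List (Option Int))), Dom_pydict_to_pylist pydict → Pre_pydict_to_pylist pydict → Spec_pydict_to_pylist pydict (pydict_to_pylist pydict)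

-- ===== LEMMAS AND PROOFS =====

-- the canonical row at index i
def pvRow (cs : List (String × List (Option Int))) (i : Nat) : List (String × Option Int) :=
  cs.map (fun kv => (kv.1, kv.2.getD i none))

theorem pvLookupA_eq {pydict : List (String × List (Option Int))} (hnd : (pydict.map Prod.fst).Nodup)
    {kv : String × List (Option Int)} (hmem : kv ∈ pydict) : pvLookupA pydict kv.1 = kv.2 := by
  induction pydict with
  | nil => cases hmem
  | cons p rest ih =>
    simp only [List.map_cons, List.nodup_cons] at hnd
    rcases List.mem_cons.mp hmem with h | h
    · subst h; simp [pvLookupA]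
    · have hne : ¬ (p.1 == kv.1) = true := by
        simp only [beq_iff_eq]
        intro he
        exact hnd.1 (he ▸ (List.mem_map.mpr ⟨kv, h, rfl⟩))
      simpa [pvLookupA, List.find?, hne] using ih hnd.2 h

theorem pvRowInsert_fresh (row : List (String × Option Int)) (k : String) (v : Option Int)
    (h : k ∉ row.map Prod.fst) : pvRowInsert row k v = row ++ [(k, v)] := by
  induction row with
  | nil => rfl
  | cons p rest ih =>
    simp only [List.map_cons, List.mem_cons] at h
    push Not at h
    have : ¬ (p.1 == k) = true := by simp [Ne.symm h.1]
    simp [pvRowInsert, this, ih h.2]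

theorem pvSetD_cons_succ {α : Type} (x : α) (rest : List α) (s : Int) (hs : 0 ≤ s) (v : α) :
    PySem.List.pySetD (x :: rest) (s + 1) v = x :: PySem.List.pySetD rest s v := by
  obtain ⟨n, rfl⟩ := Int.eq_ofNat_of_zero_le hs
  have h0 : (0 : Int) ≤ (n : Int) + 1 := by positivity
  by_cases hn : n < rest.length <;>
    simp [PySem.List.pySetD, PySem.List.pySet?, PySem.List.pyIdx?, h0, hn]

theorem pvGetD_cons_succ {α : Type} (x : α) (rest : List α) (s : Int) (hs : 0 ≤ s) (d : α) :
    PySem.List.pyGetD (x :: rest) (s + 1) d = PySem.List.pyGetD rest s d := by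
  obtain ⟨n, rfl⟩ := Int.eq_ofNat_of_zero_le hs
  have h1 : ((n : Int) + 1) = ((n + 1 : Nat) : Int) := by push_cast; ring
  rw [h1, PySem.List.pyGetD_natCast, PySem.List.pyGetD_natCast]
  simp [List.getD]

-- the inner enumerate fold, with starting index s
def pvInner (k : String) (col : List (Option Int)) (s : Int) (acc : List (List (String × Option Int))) : List (List (String × Option Int)) :=
  (PySem.List.enumerate col s).foldl (fun res iv =>
    PySem.List.pySetD res iv.1 (pvRowInsert (PySem.List.pyGetD res iv.1 []) k iv.2)) acc

theorem pvInner_shift (k : String) (col : List (Option Int)) :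
    ∀ (s : Int), 0 ≤ s → ∀ (x : List (String × Option Int)) (rest : List (List (String × Option Int))),
      pvInner k col (s + 1) (x :: rest) = x :: pvInner k col s rest := by
  induction col with
  | nil => intro s _ x rest; simp [pvInner, PySem.List.enumerate_nil]
  | cons c cs ih =>
    intro s hs x rest
    rw [pvInner, pvInner, PySem.List.enumerate_cons, PySem.List.enumerate_cons]
    simp only [List.foldl_cons]
    rw [pvGetD_cons_succ x rest s hs, pvSetD_cons_succ x rest s hs]
    exact ih (s + 1) (by omega) x _

theorem pvInner_zero (k : String) :
    ∀ (col : List (Option Int)) (acc : List (List (String × Option Int))),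
      col.length = acc.length →
      pvInner k col 0 acc = List.zipWith (fun c r => pvRowInsert r k c) col acc := by
  intro col
  induction col with
  | nil =>
    intro acc h
    cases acc with
    | nil => simp [pvInner, PySem.List.enumerate_nil]
    | cons r rest => simp at h
  | cons c cs ih =>
    intro acc h
    cases acc with
    | nil => simp at h
    | cons r rest =>
      rw [pvInner, PySem.List.enumerate_cons]
      simp only [List.foldl_cons]
      have hget : PySem.List.pyGetD (r :: rest) (0 : Int) ([] : List (String × Option Int)) = r := by
        simp [PySem.List.pyGetD, PySem.List.pyGet?, PySem.List.pyIdx?]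
      have hset : PySem.List.pySetD (r :: rest) (0 : Int)
          (pvRowInsert (PySem.List.pyGetD (r :: rest) (0:Int) []) k c)
          = pvRowInsert r k c :: rest := by
        rw [hget]; simp [PySem.List.pySetD, PySem.List.pySet?, PySem.List.pyIdx?]
      rw [hset]
      have hshift := pvInner_shift k cs 0 (by omega) (pvRowInsert r k c) rest
      rw [zero_add] at hshift
      rw [show ((0:Int) + 1) = 1 by norm_num]
      rw [show (List.foldl (fun res iv =>
            PySem.List.pySetD res iv.1 (pvRowInsert (PySem.List.pyGetD res iv.1 []) k iv.2))
            (pvRowInsert r k c :: rest) (PySem.List.enumerate cs 1))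
          = pvInner k cs 1 (pvRowInsert r k c :: rest) from rfl]
      rw [hshift]
      simp only [List.length_cons] at h
      rw [ih rest (by omega)]
      simp [List.zipWith]

theorem pvRow_append (P : List (String × List (Option Int))) (c : String × List (Option Int)) (i : Nat) :
    pvRow (P ++ [c]) i = pvRow P i ++ [(c.1, c.2.getD i none)] := by
  simp [pvRow]

theorem pvRow_keys (P : List (String × List (Option Int))) (i : Nat) :
    (pvRow P i).map Prod.fst = P.map Prod.fst := by
  simp [pvRow]

theorem pvOuter (n : Nat) :
    ∀ (cs P : List (String × List (Option Int))),
      (∀ kv ∈ cs, kv.2.length = n) →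
      ((P ++ cs).map Prod.fst).Nodup →
      cs.foldl (fun result kcol => pvInner kcol.1 kcol.2 0 result)
          ((List.range n).map (fun i => pvRow P i))
        = (List.range n).map (fun i => pvRow (P ++ cs) i) := by
  intro cs
  induction cs with
  | nil => intro P _ _; simp
  | cons c rest ih =>
    intro P hlen hnd
    simp only [List.foldl_cons]
    have hc2 : c.2.length = n := hlen c (by simp)
    have hstep : pvInner c.1 c.2 0 ((List.range n).map (fun i => pvRow P i))
        = (List.range n).map (fun i => pvRow (P ++ [c]) i) := by
      rw [pvInner_zero c.1 c.2 _ (by simp [hc2])]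
      apply List.ext_getElem
      · simp [hc2]
      · intro j h1 h2
        have hj : j < n := by simpa using h2
        have hjc : j < c.2.length := by omega
        simp only [List.getElem_zipWith, List.getElem_map, List.getElem_range]
        rw [pvRow_append]
        have hfresh : c.1 ∉ (pvRow P j).map Prod.fst := by
          rw [pvRow_keys]
          intro hc
          rw [List.map_append, List.nodup_append] at hnd
          exact hnd.2.2 c.1 hc c.1 (by simp) rfl
        rw [pvRowInsert_fresh _ _ _ hfresh]
        rw [List.getD_eq_getElem c.2 none hjc]
    rw [hstep]
    have hP : P ++ c :: rest = (P ++ [c]) ++ rest := by simp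
    rw [hP] at hnd ⊢
    exact ih (P ++ [c]) (fun kv h => hlen kv (by simp [h])) hnd

theorem pvA_eq (pydict : List (String × List (Option Int))) (hp : pydict ≠ [])
    (hpre : Pre_pydict_to_pylist pydict) :
    pydict_to_pylist pydict
      = (List.range (pydict.headD ("", [])).2.length).map (fun i => pvRow pydict i) := by
  obtain ⟨hnd, hlen⟩ := hpre
  set n := (pydict.headD ("", [])).2.length with hn
  have hhead : (pydict.map (fun kv => (kv.2.length : Int))).headD 0 = (n : Int) := by
    rcases pydict with _ | ⟨p, rest⟩
    · exact absurd rfl hp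
    · have h := hlen p (by simp)
      simp only [List.map_cons, List.headD_cons]
      exact_mod_cast h
  have hall : ((pydict.map (fun kv => (kv.2.length : Int))).all
      (fun l => l == (pydict.map (fun kv => (kv.2.length : Int))).headD 0)) = true := by
    rw [hhead]
    simp only [List.all_eq_true, beq_iff_eq]
    intro l hl
    obtain ⟨kv, hkv, rfl⟩ := List.mem_map.mp hl
    exact_mod_cast hlen kv hkv
  rw [pydict_to_pylist]
  rw [if_neg hp, if_pos hall, hhead]
  by_cases hn0 : (n : Int) = 0
  · have hnz : n = 0 := by exact_mod_cast hn0
    rw [if_pos hn0, hnz]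
    simp
  · rw [if_neg hn0]
    rw [PySem.List.pyRange_one]
    simp only [sub_zero, Int.toNat_natCast, List.map_map]
    apply List.map_congr_left
    intro i hi
    simp only [Function.comp_apply, zero_add]
    unfold pvRow
    apply List.map_congr_left
    intro kv hkv
    rw [pvLookupA_eq hnd hkv, PySem.List.pyGetD_natCast]

theorem pvB_eq (pydict : List (String × List (Option Int))) (hp : pydict ≠ [])
    (hpre : Pre_pydict_to_pylist pydict) :
    pydict_to_pylist_alt pydict
      = (List.range (pydict.headD ("", [])).2.length).map (fun i => pvRow pydict i) := by
  obtain ⟨hnd, hlen⟩ := hpre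
  set n := (pydict.headD ("", [])).2.length with hn
  have hhead : (pydict.map (fun kv => (kv.2.length : Int))).headD 0 = (n : Int) := by
    rcases pydict with _ | ⟨p, rest⟩
    · exact absurd rfl hp
    · have h := hlen p (by simp)
      simp only [List.map_cons, List.headD_cons]
      exact_mod_cast h
  have hany : ((pydict.map (fun kv => (kv.2.length : Int))).any
      (fun l => l != (pydict.map (fun kv => (kv.2.length : Int))).headD 0)) = false := by
    rw [hhead]
    simp only [List.any_eq_false, bne_iff_ne, ne_eq, not_not]
    intro l hl
    obtain ⟨kv, hkv, rfl⟩ := List.mem_map.mp hl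
    exact_mod_cast hlen kv hkv
  rw [pydict_to_pylist_alt]
  rw [if_neg hp, if_neg (by rw [hany]; simp), hhead]
  simp only [Int.toNat_natCast]
  have hrepl : (List.replicate n ([] : List (String × Option Int)))
      = (List.range n).map (fun i => pvRow [] i) := by
    simp only [pvRow, List.map_nil]
    rw [List.map_const', List.length_range]
  rw [hrepl]
  have hout := pvOuter n pydict [] (fun kv h => hlen kv h) (by simpa using hnd)
  simpa [pvInner] using hout

-- ===== VERDICT (by name: the statement is the Claim_ definition above) =====
theorem pydict_to_pylist_spec : Claim_equal_pydict_to_pylist := by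
  intro pydict _ hpre
  unfold Spec_pydict_to_pylist
  by_cases hp : pydict = []
  · subst hp; rfl
  · rw [pvA_eq pydict hp hpre, pvB_eq pydict hp hpre]
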